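-- pv_equiv track=rewrite | github.com/ARG-NCTU/oop-python-nycu | tests/group8/113511253/lec3_strings_algos.py | perfect_cube
-- ===== SOURCE A (Python) =====
-- def perfect_cube(cube):
--     """
--     Uses guess and check to find perfect cube root.
--     """
--     cube = int(cube)
--     for guess in range(abs(cube) + 1):
--         if guess**3 == abs(cube):
--             if cube < 0:
--                 return -guess
--             return guess
--     return None
-- ===== SOURCE B (Python) =====
-- def perfect_cube(cube):
--     """Binary search for the integer cube root (None if |cube| is not a perfect cube)."""
--     cube = int(cube)
--     n = abs(cube)
--     lo, hi = 0, n
--     while lo <= hi: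
--         mid = (lo + hi) // 2
--         m3 = mid ** 3
--         if m3 == n:
--             return -mid if cube < 0 else mid
--         if m3 < n:
--             lo = mid + 1
--         else:
--             hi = mid - 1
--     return None
-- ===== Notes on version B (the rewrite author's own statement) =====
-- stated objective: faster
-- what changed: Replaced A's linear guess-and-check scan over range(|cube|+1) by a binary search for the cube root on [0, |cube|].
import Mathlib
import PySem

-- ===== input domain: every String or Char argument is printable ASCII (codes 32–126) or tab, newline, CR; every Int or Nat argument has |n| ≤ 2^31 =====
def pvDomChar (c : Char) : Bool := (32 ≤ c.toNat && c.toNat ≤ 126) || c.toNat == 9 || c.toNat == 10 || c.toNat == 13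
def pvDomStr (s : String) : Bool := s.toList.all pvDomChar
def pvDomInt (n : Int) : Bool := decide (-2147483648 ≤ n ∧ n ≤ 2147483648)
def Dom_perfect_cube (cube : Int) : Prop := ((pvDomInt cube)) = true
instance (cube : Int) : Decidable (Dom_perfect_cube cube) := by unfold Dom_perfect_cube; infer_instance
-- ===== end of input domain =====

-- B replaces A's linear guess-and-check scan over range(|cube|+1) by a binary search on [0, |cube|] (objective: faster).

-- ===== PORT A =====
-- the for-loop with its early returns, over the list range(abs(cube)+1)
def pcLoopA (cube : Int) : List Int → Option Int
  | [] => none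
  | g :: rest =>
      if g ^ 3 = |cube| then
        if cube < 0 then some (-g) else some g
      else pcLoopA cube rest

def perfect_cube (cube : Int) : Option Int :=
  pcLoopA cube (PySem.List.pyRange 0 (|cube| + 1) 1)

-- ===== PORT B =====
-- the while-loop of B: binary search on [lo, hi]
def pcSearch (cube n lo hi : Int) : Option Int :=
  if _h : lo ≤ hi then
    let mid := PySem.Int.floordiv (lo + hi) 2
    let m3 := mid ^ 3
    if m3 = n then
      if cube < 0 then some (-mid) else some mid
    else if m3 < n then pcSearch cube n (mid + 1) hi
    else pcSearch cube n lo (mid - 1)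
  else none
termination_by (hi + 1 - lo).toNat
decreasing_by
  · have := PySem.Int.floordiv_two_mid_bounds _h
    omega
  · have := PySem.Int.floordiv_two_mid_bounds _h
    omega

def perfect_cube_alt (cube : Int) : Option Int :=
  pcSearch cube |cube| 0 |cube|

-- ===== PRECONDITION & SPEC =====
def Spec_perfect_cube (cube : Int) (out : Option Int) : Prop := out = perfect_cube_alt cube
instance (cube : Int) (out : Option Int) : Decidable (Spec_perfect_cube cube out) := by unfold Spec_perfect_cube; infer_instance

-- ===== CLAIM (what is proved, stated in full; the proofs are below) =====
def Claim_equal_perfect_cube : Prop := ∀ (cube : Int), Dom_perfect_cube cube → Spec_perfect_cube cube (perfect_cube cube)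

-- ===== LEMMAS AND PROOFS =====

-- cubing is monotone/injective on nonnegatives
lemma cube_lt_cube {a b : Int} (_ha : 0 ≤ a) (h : a < b) : a ^ 3 < b ^ 3 := by
  nlinarith [sq_nonneg a, sq_nonneg b, sq_nonneg (a + b)]

lemma cube_inj {a b : Int} (ha : 0 ≤ a) (hb : 0 ≤ b) (h : a ^ 3 = b ^ 3) : a = b := by
  rcases lt_trichotomy a b with hlt | he | hgt
  · exact absurd h (ne_of_lt (cube_lt_cube ha hlt))
  · exact he
  · exact absurd h.symm (ne_of_lt (cube_lt_cube hb hgt))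

-- A's loop returns none when no element of the list cubes to |cube|
lemma pcLoopA_none (cube : Int) (l : List Int)
    (h : ∀ g ∈ l, g ^ 3 ≠ |cube|) : pcLoopA cube l = none := by
  induction l with
  | nil => rfl
  | cons g rest ih =>
      simp only [pcLoopA]
      rw [if_neg (h g (by simp))]
      exact ih (fun x hx => h x (by simp [hx]))

-- A's loop finds the (unique nonnegative) root when it is in the list
lemma pcLoopA_some (cube r : Int) (l : List Int)
    (hnn : ∀ g ∈ l, 0 ≤ g) (hr : 0 ≤ r) (hmem : r ∈ l) (hcube : r ^ 3 = |cube|) :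
    pcLoopA cube l = if cube < 0 then some (-r) else some r := by
  induction l with
  | nil => cases hmem
  | cons g rest ih =>
      simp only [pcLoopA]
      by_cases hg : g ^ 3 = |cube|
      · have : g = r := cube_inj (hnn g (by simp)) hr (by rw [hg, hcube])
        rw [if_pos hg, this]
      · rw [if_neg hg]
        have hmem' : r ∈ rest := by
          rcases List.mem_cons.mp hmem with he | h'
          · exact absurd (he ▸ hcube) hg
          · exact h'
        exact ih (fun x hx => hnn x (by simp [hx])) hmem'

-- B's search returns none when no element of [lo, hi] cubes to n
lemma pcSearch_none (cube n : Int) : ∀ (k : Nat) (lo hi : Int), (hi + 1 - lo).toNat = k →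
    (∀ r, lo ≤ r → r ≤ hi → r ^ 3 ≠ n) → pcSearch cube n lo hi = none := by
  intro k
  induction k using Nat.strong_induction_on with
  | _ k ih =>
    intro lo hi hk h
    rw [pcSearch]
    by_cases hle : lo ≤ hi
    · have hb := PySem.Int.floordiv_two_mid_bounds hle
      simp only [dif_pos hle]
      set mid := PySem.Int.floordiv (lo + hi) 2 with hmid
      by_cases h1 : mid ^ 3 = n
      · exact absurd h1 (h mid hb.1 hb.2)
      · rw [if_neg h1]
        by_cases h2 : mid ^ 3 < n
        · rw [if_pos h2]
          exact ih (hi + 1 - (mid + 1)).toNat (by omega) _ _ rfl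
            (fun r hr1 hr2 => h r (by omega) hr2)
        · rw [if_neg h2]
          exact ih ((mid - 1) + 1 - lo).toNat (by omega) _ _ rfl
            (fun r hr1 hr2 => h r hr1 (by omega))
    · simp [hle]

-- B's search finds the root when it lies in [lo, hi] with 0 ≤ lo
lemma pcSearch_some (cube n r : Int) (hr : 0 ≤ r) (hc : r ^ 3 = n) :
    ∀ (k : Nat) (lo hi : Int), (hi + 1 - lo).toNat = k → 0 ≤ lo → lo ≤ r → r ≤ hi →
    pcSearch cube n lo hi = if cube < 0 then some (-r) else some r := by
  intro k
  induction k using Nat.strong_induction_on with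
  | _ k ih =>
    intro lo hi hk hlo h1 h2
    have hle : lo ≤ hi := le_trans h1 h2
    have hb := PySem.Int.floordiv_two_mid_bounds hle
    rw [pcSearch]
    simp only [dif_pos hle]
    set mid := PySem.Int.floordiv (lo + hi) 2 with hmid
    by_cases he : mid ^ 3 = n
    · have hmr : mid = r := cube_inj (by omega) hr (by rw [he, hc])
      rw [if_pos he, hmr]
    · rw [if_neg he]
      by_cases hlt : mid ^ 3 < n
      · -- mid³ < n = r³ so mid < r
        rw [if_pos hlt]
        have hmr : mid < r := by
          by_contra hcon
          rcases eq_or_lt_of_le (show r ≤ mid by omega) with heq | hl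
          · rw [← heq] at hlt; omega
          · have := cube_lt_cube (a := r) (b := mid) hr hl
            omega
        exact ih (hi + 1 - (mid + 1)).toNat (by omega) _ _ rfl (by omega) (by omega) h2
      · -- n < mid³ forces r < mid
        rw [if_neg hlt]
        have hgt : n < mid ^ 3 := lt_of_le_of_ne (by omega) (Ne.symm he)
        have hrm : r < mid := by
          by_contra hcon
          rcases eq_or_lt_of_le (show mid ≤ r by omega) with heq | hl
          · rw [heq] at hgt; omega
          · have := cube_lt_cube (a := mid) (b := r) (by omega) hl
            omega
        exact ih ((mid - 1) + 1 - lo).toNat (by omega) _ _ rfl hlo h1 (by omega)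

-- a nonnegative cube root of n is at most n
lemma root_le {r n : Int} (hr : 0 ≤ r) (hc : r ^ 3 = n) : r ≤ n := by
  nlinarith [sq_nonneg r, sq_nonneg (r - 1)]

-- ===== VERDICT (by name: the statement is the Claim_ definition above) =====
theorem perfect_cube_spec : Claim_equal_perfect_cube := by
  intro cube _
  unfold Spec_perfect_cube perfect_cube perfect_cube_alt
  by_cases h : ∃ r, 0 ≤ r ∧ r ^ 3 = |cube|
  · obtain ⟨r, hr, hc⟩ := h
    have hle : r ≤ |cube| := root_le hr hc
    rw [pcLoopA_some cube r _
          (fun g hg => ((PySem.List.mem_pyRange_one).mp hg).1)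
          hr
          ((PySem.List.mem_pyRange_one).mpr ⟨hr, by omega⟩)
          hc,
        pcSearch_some cube |cube| r hr hc _ 0 |cube| rfl le_rfl hr hle]
  · rw [pcLoopA_none cube _ (fun g hg hgc =>
          h ⟨g, ((PySem.List.mem_pyRange_one).mp hg).1, hgc⟩),
        pcSearch_none cube |cube| _ 0 |cube| rfl (fun r h1 _ hrc => h ⟨r, h1, hrc⟩)]
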